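-- pv_equiv track=rewrite | github.com/Ryder-MHumble/Dean-NanoBot | api_dash.py | _match_price_label
-- ===== SOURCE A (Python) =====
-- _PRICE_TABLE: tuple[tuple[str, float, float], ...] = (
--     # Claude 4 series
--     ("claude-opus-4",          5.00,  25.00),
--     ("claude-sonnet-4",        3.00,  15.00),
--     ("claude-haiku-4",         1.00,   5.00),
--     # Claude 3.x series
--     ("claude-3.7-sonnet",      3.00,  15.00),
--     ("claude-3.5-sonnet",      6.00,  30.00),
--     ("claude-3.5-haiku",       0.80,   4.00),
--     ("claude-3-opus",         15.00,  75.00),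
--     ("claude-3-haiku",         0.25,   1.25),
--     # OpenAI
--     ("gpt-4o-mini",            0.15,   0.60),
--     ("gpt-4o",                 2.50,  10.00),
--     # DeepSeek
--     ("deepseek-r1",            0.55,   2.19),
--     ("deepseek-v3",            0.27,   1.10),
--     ("deepseek-chat",          0.27,   1.10),
--     # Google
--     ("gemini-2.5-pro",         1.25,  10.00),
--     ("gemini-2.0-flash",       0.10,   0.40),
--     ("gemini-1.5-pro",         1.25,   5.00),
--     # Other
--     ("qwen-max",               1.60,   6.40),
--     ("qwen-plus",              0.40,   1.20),
--     ("glm-4",                  0.14,   0.14),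
--     ("kimi-k2",                0.60,   2.50),
-- )
--
-- def _match_price_label(model: str) -> str:
--     """Return a human-readable price label for the model, or 'NO MATCH'."""
--     model_lower = model.lower()
--     candidates = [model_lower]
--     parts = model_lower.split("/")
--     for i in range(1, len(parts)):
--         candidates.append("/".join(parts[i:]))
--     for candidate in candidates:
--         for keyword, in_price, out_price in _PRICE_TABLE:
--             if keyword in candidate:
--                 return f"${in_price:.2f}/${out_price:.2f} per 1M"
--     return "NO MATCH"
-- ===== SOURCE B (Python) =====
-- # B: one first-match pass of the price table over the whole lowercased model
-- # (every slash-suffix candidate A builds is a substring of the full string, so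
-- # A's outer candidate loop is redundant); prices are kept as integer cents and
-- # the label is formatted from them, avoiding float formatting.
-- _PRICE_CENTS: tuple[tuple[str, int, int], ...] = (
--     ("claude-opus-4",      500,  2500),
--     ("claude-sonnet-4",    300,  1500),
--     ("claude-haiku-4",     100,   500),
--     ("claude-3.7-sonnet",  300,  1500),
--     ("claude-3.5-sonnet",  600,  3000),
--     ("claude-3.5-haiku",    80,   400),
--     ("claude-3-opus",     1500,  7500),
--     ("claude-3-haiku",      25,   125),
--     ("gpt-4o-mini",         15,    60),
--     ("gpt-4o",             250,  1000),
--     ("deepseek-r1",         55,   219),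
--     ("deepseek-v3",         27,   110),
--     ("deepseek-chat",       27,   110),
--     ("gemini-2.5-pro",     125,  1000),
--     ("gemini-2.0-flash",    10,    40),
--     ("gemini-1.5-pro",     125,   500),
--     ("qwen-max",           160,   640),
--     ("qwen-plus",           40,   120),
--     ("glm-4",               14,    14),
--     ("kimi-k2",             60,   250),
-- )
--
-- def _fmt_cents(c: int) -> str:
--     return f"{c // 100}.{c % 100:02d}"
--
-- def _match_price_label(model: str) -> str:
--     """Return a human-readable price label for the model, or 'NO MATCH'."""
--     ml = model.lower()
--     return next(
--         (f"${_fmt_cents(i)}/${_fmt_cents(o)} per 1M" for kw, i, o in _PRICE_CENTS if kw in ml),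
--         "NO MATCH",
--     )
-- ===== Notes on version B (the rewrite author's own statement) =====
-- stated objective: simpler
-- what changed: B drops A's construction of the slash-suffix candidate list and its nested candidate-by-table loop (every suffix candidate is a substring of the full lowercased model), doing one first-match pass of the table over the lowercased model via next(), with prices kept as integer cents and the label formatted from them.
import Mathlib
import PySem

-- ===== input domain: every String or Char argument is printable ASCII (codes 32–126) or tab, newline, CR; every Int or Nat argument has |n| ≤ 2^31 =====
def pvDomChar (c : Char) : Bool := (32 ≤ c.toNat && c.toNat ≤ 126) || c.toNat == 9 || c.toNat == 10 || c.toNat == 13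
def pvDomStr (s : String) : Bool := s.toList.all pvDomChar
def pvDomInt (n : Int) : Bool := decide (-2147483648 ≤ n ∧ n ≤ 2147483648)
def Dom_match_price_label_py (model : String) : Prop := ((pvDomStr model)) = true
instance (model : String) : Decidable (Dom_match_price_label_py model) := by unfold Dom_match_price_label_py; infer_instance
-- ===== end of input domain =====

-- B replaces A's slash-suffix candidate list and nested candidate-by-table loop by one first-match
-- pass of the price table over the whole lowercased model, with prices held as integer cents
-- and the label formatted from them (objective: simpler).

-- ===== PORT A =====
-- A's table: keyword ↦ label.  A stores float prices only to render them into the constant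
-- f"${in:.2f}/${out:.2f} per 1M" labels; those constants are rendered at port time (exact:
-- each is the unique %.2f rendering of the table's literal).
def pvPriceTable : List (String × String) :=
  [ ("claude-opus-4",     "$5.00/$25.00 per 1M"),
    ("claude-sonnet-4",   "$3.00/$15.00 per 1M"),
    ("claude-haiku-4",    "$1.00/$5.00 per 1M"),
    ("claude-3.7-sonnet", "$3.00/$15.00 per 1M"),
    ("claude-3.5-sonnet", "$6.00/$30.00 per 1M"),
    ("claude-3.5-haiku",  "$0.80/$4.00 per 1M"),
    ("claude-3-opus",     "$15.00/$75.00 per 1M"),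
    ("claude-3-haiku",    "$0.25/$1.25 per 1M"),
    ("gpt-4o-mini",       "$0.15/$0.60 per 1M"),
    ("gpt-4o",            "$2.50/$10.00 per 1M"),
    ("deepseek-r1",       "$0.55/$2.19 per 1M"),
    ("deepseek-v3",       "$0.27/$1.10 per 1M"),
    ("deepseek-chat",     "$0.27/$1.10 per 1M"),
    ("gemini-2.5-pro",    "$1.25/$10.00 per 1M"),
    ("gemini-2.0-flash",  "$0.10/$0.40 per 1M"),
    ("gemini-1.5-pro",    "$1.25/$5.00 per 1M"),
    ("qwen-max",          "$1.60/$6.40 per 1M"),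
    ("qwen-plus",         "$0.40/$1.20 per 1M"),
    ("glm-4",             "$0.14/$0.14 per 1M"),
    ("kimi-k2",           "$0.60/$2.50 per 1M") ]

-- A's inner loop: first table entry whose keyword is a substring of the candidate.
def pvScanA (c : String) : List (String × String) → Option String
  | [] => none
  | (kw, lbl) :: rest => if PySem.Str.isIn kw c then some lbl else pvScanA c rest

-- A's outer loop over the candidate list.
def pvLoopA : List String → String
  | [] => "NO MATCH"
  | c :: cs =>
      match pvScanA c pvPriceTable with
      | some lbl => lbl
      | none => pvLoopA cs

def match_price_label_py (model : String) : String :=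
  let modelLower := PySem.Str.lower model
  -- model_lower.split("/"): sep "/" is nonempty, so split? is always some
  let parts := (PySem.Str.split? modelLower "/").getD []
  -- range(1, len(parts)) = (List.range parts.length).drop 1; parts[i:] with 0 ≤ i is parts.drop i
  let candidates := modelLower ::
    ((List.range parts.length).drop 1).map (fun i => PySem.Str.join "/" (parts.drop i))
  pvLoopA candidates

-- ===== PORT B =====
-- B's table: keyword ↦ (input cents, output cents).
def pvCentsTable : List (String × Int × Int) :=
  [ ("claude-opus-4",      500,  2500),
    ("claude-sonnet-4",    300,  1500),
    ("claude-haiku-4",     100,   500),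
    ("claude-3.7-sonnet",  300,  1500),
    ("claude-3.5-sonnet",  600,  3000),
    ("claude-3.5-haiku",    80,   400),
    ("claude-3-opus",     1500,  7500),
    ("claude-3-haiku",      25,   125),
    ("gpt-4o-mini",         15,    60),
    ("gpt-4o",             250,  1000),
    ("deepseek-r1",         55,   219),
    ("deepseek-v3",         27,   110),
    ("deepseek-chat",       27,   110),
    ("gemini-2.5-pro",     125,  1000),
    ("gemini-2.0-flash",    10,    40),
    ("gemini-1.5-pro",     125,   500),
    ("qwen-max",           160,   640),
    ("qwen-plus",           40,   120),
    ("glm-4",               14,    14),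
    ("kimi-k2",             60,   250) ]

-- f"{c // 100}.{c % 100:02d}" (exact for the table's 0 ≤ c values: c % 100 is 0..99)
def pvFmtCents (c : Int) : String :=
  PySem.Int.toStr (PySem.Int.floordiv c 100) ++ "." ++
    (if PySem.Int.mod c 100 < 10 then "0" else "") ++ PySem.Int.toStr (PySem.Int.mod c 100)

def pvLabelB (i o : Int) : String := "$" ++ pvFmtCents i ++ "/$" ++ pvFmtCents o ++ " per 1M"

-- next((label for kw, i, o in table if kw in ml), "NO MATCH")
def match_price_label_py_alt (model : String) : String :=
  let ml := PySem.Str.lower model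
  ((pvCentsTable.find? (fun p => PySem.Str.isIn p.1 ml)).map
      (fun p => pvLabelB p.2.1 p.2.2)).getD "NO MATCH"

-- ===== PRECONDITION & SPEC =====
def Spec_match_price_label_py (model : String) (out : String) : Prop := out = match_price_label_py_alt model
instance (model : String) (out : String) : Decidable (Spec_match_price_label_py model out) := by unfold Spec_match_price_label_py; infer_instance

-- ===== CLAIM (what is proved, stated in full; the proofs are below) =====
def Claim_equal_match_price_label_py : Prop := ∀ (model : String), Dom_match_price_label_py model → Spec_match_price_label_py model (match_price_label_py model)

-- ===== LEMMAS AND PROOFS =====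

-- join over a list ending in [x]
theorem pv_join_append_singleton (sep x : List Char) (ys : List (List Char)) :
    PySem.Chars.join sep (ys ++ [x]) =
      (if ys.isEmpty then x else PySem.Chars.join sep ys ++ sep ++ x) := by
  induction ys with
  | nil => simp [PySem.Chars.join_singleton]
  | cons y ys ih =>
    cases ys with
    | nil => simp [PySem.Chars.join_cons_cons, PySem.Chars.join_singleton]
    | cons z zs =>
      simp only [List.cons_append, PySem.Chars.join_cons_cons] at *
      simp [ih, List.append_assoc]

-- invariant of splitOn's worker: joining the output restores acc, cur and the remaining input
theorem pv_go_join (sep : List Char) :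
    ∀ (fuel : Nat) (l cur : List Char) (acc : List (List Char)),
      PySem.Chars.join sep (PySem.Chars.splitOn.go sep fuel l cur acc) =
        PySem.Chars.join sep acc.reverse ++ (if acc.isEmpty then [] else sep) ++ cur.reverse ++ l := by
  intro fuel
  induction fuel with
  | zero =>
    intro l cur acc
    simp only [PySem.Chars.splitOn.go]
    rw [show ((cur.reverse ++ l) :: acc).reverse = acc.reverse ++ [cur.reverse ++ l] by simp,
        pv_join_append_singleton]
    cases acc <;> simp
  | succ fuel ih =>
    intro l cur acc
    cases l with
    | nil =>
      simp only [PySem.Chars.splitOn.go]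
      rw [show (cur.reverse :: acc).reverse = acc.reverse ++ [cur.reverse] by simp,
          pv_join_append_singleton]
      cases acc <;> simp
    | cons c rest =>
      simp only [PySem.Chars.splitOn.go]
      by_cases hp : sep.isPrefixOf (c :: rest) = true
      · simp only [hp, if_true]
        rw [ih]
        obtain ⟨t, ht⟩ := (List.isPrefixOf_iff_prefix.mp hp)
        have hdrop : List.drop sep.length (c :: rest) = t := by
          rw [← ht, List.drop_left]
        rw [hdrop,
            show (cur.reverse :: acc).reverse = acc.reverse ++ [cur.reverse] by simp,
            pv_join_append_singleton]
        cases acc <;> simp [← ht, List.append_assoc]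
      · simp only [hp, Bool.false_eq_true, if_false]
        rw [ih]
        simp [List.append_assoc]

-- sep.join(s.split(sep)) == s
theorem pv_join_splitOn (s sep : List Char) :
    PySem.Chars.join sep (PySem.Chars.splitOn s sep) = s := by
  unfold PySem.Chars.splitOn
  rw [pv_go_join]
  simp

-- joining a drop-suffix of the parts is a suffix of joining all parts
theorem pv_join_drop_suffix (sep : List Char) :
    ∀ (l : List (List Char)) (i : Nat),
      PySem.Chars.join sep (l.drop i) <:+ PySem.Chars.join sep l := by
  intro l
  induction l with
  | nil => intro i; simp
  | cons x xs ih =>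
    intro i
    cases i with
    | zero => simp
    | succ i =>
      have h1 := ih i
      have h2 : PySem.Chars.join sep xs <:+ PySem.Chars.join sep (x :: xs) := by
        cases xs with
        | nil => simp [PySem.Chars.join_nil]
        | cons y ys =>
          rw [PySem.Chars.join_cons_cons]
          exact ⟨x ++ sep, by simp [List.append_assoc]⟩
      rw [List.drop_succ_cons]
      exact h1.trans h2

-- no keyword matches c exactly when every table keyword fails the substring test
theorem pv_scan_none_iff (c : String) : ∀ t : List (String × String),
    pvScanA c t = none ↔ ∀ p ∈ t, PySem.Chars.isIn p.1.toList c.toList = false := by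
  intro t
  induction t with
  | nil => simp [pvScanA]
  | cons p rest ih =>
    by_cases hk : PySem.Chars.isIn p.1.toList c.toList = true
    · simp [pvScanA, hk]
    · simp only [Bool.not_eq_true] at hk
      simp [pvScanA, hk, ih]

-- if no keyword matches d then no keyword matches any substring c of d
theorem pv_scan_mono (c d : String) (h : c.toList <:+: d.toList)
    (t : List (String × String)) (hd : pvScanA d t = none) : pvScanA c t = none := by
  rw [pv_scan_none_iff] at hd ⊢
  intro p hp
  rw [← Bool.not_eq_true]
  intro hc
  have hkd := hd p hp
  rw [(PySem.Chars.isIn_iff_infix p.1.toList d.toList).mpr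
    (((PySem.Chars.isIn_iff_infix p.1.toList c.toList).mp hc).trans h)] at hkd
  simp at hkd

-- A's outer loop returns NO MATCH when every candidate fails the table scan
theorem pv_loop_none : ∀ cs : List String,
    (∀ c ∈ cs, pvScanA c pvPriceTable = none) → pvLoopA cs = "NO MATCH" := by
  intro cs
  induction cs with
  | nil => intro _; rfl
  | cons c rest ih =>
    intro h
    simp only [pvLoopA, h c (by simp)]
    exact ih (fun d hd => h d (by simp [hd]))

-- entry of A's table paired with the matching entry of B's table: same keyword,
-- A's rendered label = B's formatted label
def pvCompat (a : String × String) (b : String × Int × Int) : Prop :=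
  a.1 = b.1 ∧ a.2 = pvLabelB b.2.1 b.2.2

-- B's find?-pass over a cents table equals A's scan of a compatible label table
theorem pv_findB_eq_scanA (ml : String) :
    ∀ (ta : List (String × String)) (tb : List (String × Int × Int)),
      List.Forall₂ pvCompat ta tb →
      (((tb.find? (fun p => PySem.Str.isIn p.1 ml)).map
          (fun p => pvLabelB p.2.1 p.2.2)).getD "NO MATCH") =
        (match pvScanA ml ta with | some lbl => lbl | none => "NO MATCH") := by
  intro ta tb h
  induction h with
  | nil => rfl
  | cons hab _ ih =>
    rename_i a b ta' tb' _
    obtain ⟨hk, hl⟩ := hab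
    simp only [pvScanA, List.find?_cons, hk]
    by_cases hm : PySem.Chars.isIn b.1.toList ml.toList = true
    · simp [PySem.Str.isIn, hm, hl]
    · simp only [Bool.not_eq_true] at hm
      simp only [PySem.Str.isIn] at ih
      simp [hm, ih]

-- the two concrete tables are compatible
theorem pv_tables_compat : List.Forall₂ pvCompat pvPriceTable pvCentsTable := by
  unfold pvPriceTable pvCentsTable
  exact (.cons ⟨rfl, rfl⟩ (.cons ⟨rfl, rfl⟩ (.cons ⟨rfl, rfl⟩ (.cons ⟨rfl, rfl⟩ (.cons ⟨rfl, rfl⟩ (.cons ⟨rfl, rfl⟩ (.cons ⟨rfl, rfl⟩ (.cons ⟨rfl, rfl⟩ (.cons ⟨rfl, rfl⟩ (.cons ⟨rfl, rfl⟩ (.cons ⟨rfl, rfl⟩ (.cons ⟨rfl, rfl⟩ (.cons ⟨rfl, rfl⟩ (.cons ⟨rfl, rfl⟩ (.cons ⟨rfl, rfl⟩ (.cons ⟨rfl, rfl⟩ (.cons ⟨rfl, rfl⟩ (.cons ⟨rfl, rfl⟩ (.cons ⟨rfl, rfl⟩ (.cons ⟨rfl, rfl⟩ .nil)))))))))))))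)))))))

-- ===== VERDICT (by name: the statement is the Claim_ definition above) =====
theorem match_price_label_py_spec : Claim_equal_match_price_label_py := by
  intro model _hdom
  unfold Spec_match_price_label_py match_price_label_py match_price_label_py_alt
  set ml := PySem.Str.lower model with hml
  -- split? "/" is always some; name the parts
  have hmap := PySem.Str.split?_map ml "/"
  cases e : PySem.Str.split? ml "/" with
  | none =>
    rw [e] at hmap
    simp [PySem.Chars.split?] at hmap
  | some ps =>
    rw [e] at hmap
    simp only [Option.map_some, PySem.Chars.split?, List.isEmpty_iff] at hmap
    rw [if_neg (by simp)] at hmap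
    have hps : ps.map String.toList = PySem.Chars.splitOn ml.toList "/".toList :=
      Option.some.inj hmap
    rw [pv_findB_eq_scanA ml pvPriceTable pvCentsTable pv_tables_compat]
    cases hscan : pvScanA ml pvPriceTable with
    | some lbl => simp [pvLoopA, hscan]
    | none =>
      simp only [e, Option.getD_some, pvLoopA, hscan]
      apply pv_loop_none
      intro c hc
      rcases List.mem_map.mp hc with ⟨i, _hi, hciq⟩
      have hcinf : c.toList <:+: ml.toList := by
        rw [← hciq]
        apply List.IsSuffix.isInfix
        rw [PySem.Str.toList_join, List.map_drop, hps]
        have := pv_join_drop_suffix "/".toList (PySem.Chars.splitOn ml.toList "/".toList) i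
        rwa [pv_join_splitOn] at this
      exact pv_scan_mono c ml hcinf pvPriceTable hscan
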